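-- pv_equiv track=rewrite | github.com/alityb/parallel-agents | tests/benchmarks/definitive_benchmark.py | company_names
-- ===== SOURCE A (Python) =====
-- def company_names(n: int) -> list[str]:
--     base = [
--         "NVIDIA",
--         "OpenAI",
--         "Anthropic",
--         "vLLM",
--         "SGLang",
--         "Meta AI",
--         "Google DeepMind",
--         "AWS Bedrock",
--         "Together AI",
--         "LMCache",
--     ]
--     return [base[i % len(base)] for i in range(n)]
-- ===== SOURCE B (Python) =====
-- def company_names(n: int) -> list[str]:
--     base = [
--         "NVIDIA",
--         "OpenAI",
--         "Anthropic",
--         "vLLM",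
--         "SGLang",
--         "Meta AI",
--         "Google DeepMind",
--         "AWS Bedrock",
--         "Together AI",
--         "LMCache",
--     ]
--     if n <= 0:
--         return []
--     q, r = divmod(n, len(base))
--     return base * q + base[:r]
-- ===== Notes on version B (the rewrite author's own statement) =====
-- stated objective: simpler
-- what changed: Replaces the per-element comprehension with modular indexing by whole-list replication (base * q) plus a remainder slice (base[:r]), with an early return [] for n <= 0.
import Mathlib
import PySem

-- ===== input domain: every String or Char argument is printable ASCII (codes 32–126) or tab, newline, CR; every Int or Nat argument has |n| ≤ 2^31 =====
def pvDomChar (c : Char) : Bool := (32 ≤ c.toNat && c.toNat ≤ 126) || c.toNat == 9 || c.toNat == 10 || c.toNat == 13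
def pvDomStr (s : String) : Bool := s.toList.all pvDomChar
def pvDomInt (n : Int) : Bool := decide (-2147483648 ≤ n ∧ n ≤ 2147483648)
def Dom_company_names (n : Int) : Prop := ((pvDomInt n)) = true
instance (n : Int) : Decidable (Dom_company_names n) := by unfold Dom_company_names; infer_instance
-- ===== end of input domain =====

-- B replaces the per-element comprehension with modular indexing by whole-list replication plus a remainder slice (objective: simpler).

-- the shared constant list 'base' of both Pythons
def pvBase : List String :=
  ["NVIDIA", "OpenAI", "Anthropic", "vLLM", "SGLang",
   "Meta AI", "Google DeepMind", "AWS Bedrock", "Together AI", "LMCache"]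

-- ===== PORT A =====
-- base[i % len(base)]: the index is always in range (0 ≤ i % 10 < 10), so pyGetD with a dummy default is exact
def company_names (n : Int) : List String :=
  (PySem.List.pyRange 0 n 1).map
    (fun i => PySem.List.pyGetD pvBase (PySem.Int.mod i (pvBase.length : Int)) "")

-- ===== PORT B =====
def company_names_alt (n : Int) : List String :=
  if n ≤ 0 then []
  else
    let q := PySem.Int.floordiv n (pvBase.length : Int)
    let r := PySem.Int.mod n (pvBase.length : Int)
    (List.replicate q.toNat pvBase).flatten ++ pvBase.take r.toNat

-- ===== PRECONDITION & SPEC =====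
def Spec_company_names (n : Int) (out : List String) : Prop := out = company_names_alt n
instance (n : Int) (out : List String) : Decidable (Spec_company_names n out) := by unfold Spec_company_names; infer_instance

-- ===== CLAIM (what is proved, stated in full; the proofs are below) =====
def Claim_equal_company_names : Prop := ∀ (n : Int), Dom_company_names n → Spec_company_names n (company_names n)

-- ===== LEMMAS AND PROOFS =====

-- the body of A's comprehension, over Nat
def pvF (k : Nat) : String := PySem.List.pyGetD pvBase (PySem.Int.mod (k : Int) 10) ""

theorem pvF_add_ten (i : Nat) : pvF (10 + i) = pvF i := by
  simp [pvF]

theorem pvBlock : (List.range 10).map pvF = pvBase := by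
  decide

theorem pvKey (q r : Nat) :
    (List.range (10 * q + r)).map pvF =
      (List.replicate q pvBase).flatten ++ (List.range r).map pvF := by
  induction q with
  | zero => simp
  | succ q ih =>
      have h : 10 * (q + 1) + r = 10 + (10 * q + r) := by omega
      rw [h, List.range_add, List.map_append, List.map_map]
      have hcomp : (pvF ∘ fun i => 10 + i) = pvF := by
        funext i; exact pvF_add_ten i
      rw [hcomp, ih, pvBlock, List.replicate_succ]
      simp

theorem pvTail (r : Nat) (hr : r < 10) : (List.range r).map pvF = pvBase.take r := by
  interval_cases r <;> decide

-- ===== VERDICT (by name: the statement is the Claim_ definition above) =====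
theorem company_names_spec : Claim_equal_company_names := by
  intro n _
  unfold Spec_company_names company_names company_names_alt
  by_cases hn : n ≤ 0
  · simp [hn, PySem.List.pyRange_one_eq_nil hn]
  · push Not at hn
    rw [if_neg (by omega)]
    rw [PySem.List.pyRange_one 0 n, List.map_map]
    have hlen : (pvBase.length : Int) = 10 := by decide
    rw [hlen]
    have hcomp : ((fun i => PySem.List.pyGetD pvBase (PySem.Int.mod i 10) "") ∘ fun k : Nat => (0 : Int) + k)
        = fun k : Nat => pvF k := by
      funext k; simp [pvF]
    rw [sub_zero, hcomp]
    have hsplit : n.toNat = 10 * (n.toNat / 10) + n.toNat % 10 := by omega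
    rw [hsplit, pvKey, pvTail _ (by omega)]
    have hq : (PySem.Int.floordiv n 10).toNat = n.toNat / 10 := by
      rw [PySem.Int.floordiv_eq_ediv_of_pos (by omega)]; omega
    have hr : (PySem.Int.mod n 10).toNat = n.toNat % 10 := by
      rw [PySem.Int.mod_eq_emod_of_pos (by omega)]; omega
    simp only [hq, hr]
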